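-- pv_equiv track=rewrite | github.com/sandeepkumar8713/pythonapps | 29_ninthFolder/sample_6.py | solution
-- ===== SOURCE A (Python) =====
-- def solution(S):
--     # Implement your solution here
--     freq_dict = dict()
--     for i, ch in enumerate(S):
--         if ch == 'a':
--             freq_dict[ch] = i
--         if ch == 'b':
--             if ch not in freq_dict:
--                 freq_dict[ch] = i
--
--     a_occr = freq_dict.get('a', None)
--     b_occr = freq_dict.get('b', None)
--
--     if a_occr is None or b_occr is None:
--         return True
--
--     if b_occr > a_occr:
--         return True
--
--     return False
-- ===== SOURCE B (Python) =====
-- def solution(S):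
--     b = S.find('b')
--     if b == -1:
--         return True
--     return 'a' not in S[b + 1:]
-- ===== Notes on version B (the rewrite author's own statement) =====
-- stated objective: simpler
-- what changed: Replaced the dict-building enumeration loop (tracking last 'a' and first 'b' indices) with a direct check: find the first 'b' and test whether any 'a' occurs in the suffix after it.
import Mathlib
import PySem

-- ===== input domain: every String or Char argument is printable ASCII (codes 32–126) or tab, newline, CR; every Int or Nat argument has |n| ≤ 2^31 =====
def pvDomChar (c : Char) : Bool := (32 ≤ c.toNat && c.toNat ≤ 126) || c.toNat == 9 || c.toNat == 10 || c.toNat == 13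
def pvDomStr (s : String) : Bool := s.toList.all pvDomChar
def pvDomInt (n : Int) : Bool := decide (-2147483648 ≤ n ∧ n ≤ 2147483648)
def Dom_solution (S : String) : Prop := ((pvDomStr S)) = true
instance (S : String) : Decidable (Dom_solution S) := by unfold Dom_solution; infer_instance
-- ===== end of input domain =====

-- B is simpler: it replaces A's dict-tracking enumeration loop with "find the first 'b',
-- then test whether any 'a' occurs after it"; same O(n) cost, equivalent on all inputs.

-- ===== PORT A =====
-- one loop step of A's 'for i, ch in enumerate(S)' body
def pvStepA (d : PySem.Dict Char Int) (p : Int × Char) : PySem.Dict Char Int :=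
  let d1 := if p.2 == 'a' then PySem.Dict.insert d p.2 p.1 else d
  if p.2 == 'b' then
    (if !(PySem.Dict.contains d1 p.2) then PySem.Dict.insert d1 p.2 p.1 else d1)
  else d1

def solution (S : String) : Bool :=
  let fd := (PySem.List.enumerate S.toList 0).foldl pvStepA PySem.Dict.empty
  match PySem.Dict.get? fd 'a' with
  | none => true
  | some a_occr =>
    match PySem.Dict.get? fd 'b' with
    | none => true
    | some b_occr => if b_occr > a_occr then true else false

-- ===== PORT B =====
def solution_alt (S : String) : Bool :=
  let b := PySem.Str.find S "b"
  if b = -1 then true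
  else !(PySem.Str.isIn "a" (PySem.Str.slice S (some (b + 1)) none))

-- ===== PRECONDITION & SPEC =====
def Spec_solution (S : String) (out : Bool) : Prop := out = solution_alt S
instance (S : String) (out : Bool) : Decidable (Spec_solution S out) := by unfold Spec_solution; infer_instance

-- ===== CLAIM (what is proved, stated in full; the proofs are below) =====
def Claim_equal_solution : Prop := ∀ (S : String), Dom_solution S → Spec_solution S (solution S)

-- ===== LEMMAS AND PROOFS =====

-- index of the first 'b' in a char list (proof-side characterisation)
def pvFirstB : List Char → Option Nat
  | [] => none
  | c :: cs => if c = 'b' then some 0 else (pvFirstB cs).map (· + 1)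

-- index of the last 'a' in a char list
def pvLastA : List Char → Option Nat
  | [] => none
  | c :: cs =>
    match pvLastA cs with
    | some j => some (j + 1)
    | none => if c = 'a' then some 0 else none

theorem pvFirstB_none {cs : List Char} (h : pvFirstB cs = none) : 'b' ∉ cs := by
  induction cs with
  | nil => simp
  | cons c cs ih =>
    simp only [pvFirstB] at h
    split at h
    · simp at h
    · rename_i hc
      simp only [Option.map_eq_none_iff] at h
      simp only [List.mem_cons, not_or]
      refine ⟨?_, ih h⟩
      intro hcb
      exact hc (by first | exact hcb | exact hcb.symm)

theorem pvFirstB_spec {cs : List Char} {j : Nat} (h : pvFirstB cs = some j) :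
    cs[j]? = some 'b' ∧ ∀ i < j, cs[i]? ≠ some 'b' := by
  induction cs generalizing j with
  | nil => simp [pvFirstB] at h
  | cons c cs ih =>
    simp only [pvFirstB] at h
    split at h
    · rename_i hc
      simp only [Option.some.injEq] at h
      subst h
      simp [hc]
    · rename_i hc
      rcases Option.map_eq_some_iff.mp h with ⟨j', hj', rfl⟩
      obtain ⟨h1, h2⟩ := ih hj'
      refine ⟨by simpa using h1, ?_⟩
      intro i hi
      cases i with
      | zero =>
        simp only [List.getElem?_cons_zero, ne_eq, Option.some.injEq]
        intro hcb
        exact hc hcb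
      | succ i => simpa using h2 i (by omega)

theorem pvLastA_none {cs : List Char} (h : pvLastA cs = none) : 'a' ∉ cs := by
  induction cs with
  | nil => simp
  | cons c cs ih =>
    cases hcs : pvLastA cs with
    | some j => simp [pvLastA, hcs] at h
    | none =>
      simp only [pvLastA, hcs] at h
      split at h
      · simp at h
      · rename_i hc
        simp only [List.mem_cons, not_or]
        refine ⟨?_, ih hcs⟩
        intro hca
        exact hc (by first | exact hca | exact hca.symm)

theorem pvLastA_spec {cs : List Char} {j : Nat} (h : pvLastA cs = some j) :
    cs[j]? = some 'a' ∧ ∀ i, j < i → cs[i]? ≠ some 'a' := by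
  induction cs generalizing j with
  | nil => simp [pvLastA] at h
  | cons c cs ih =>
    cases hcs : pvLastA cs with
    | none =>
      simp only [pvLastA, hcs] at h
      split at h
      · rename_i hc
        simp only [Option.some.injEq] at h
        subst h
        refine ⟨by simp [hc], ?_⟩
        intro i hi
        cases i with
        | zero => omega
        | succ i =>
          simp only [List.getElem?_cons_succ]
          intro hmem
          exact pvLastA_none hcs (List.mem_of_getElem? hmem)
      · simp at h
    | some j' =>
      simp only [pvLastA, hcs, Option.some.injEq] at h
      subst h
      obtain ⟨h1, h2⟩ := ih hcs
      refine ⟨by simpa using h1, ?_⟩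
      intro i hi
      cases i with
      | zero => omega
      | succ i => simpa using h2 i (by omega)

-- pvStepA computed on each kind of character
theorem pvStepA_a (d : PySem.Dict Char Int) (s : Int) :
    pvStepA d (s, 'a') = d.insert 'a' s := by
  simp [pvStepA]

theorem pvStepA_b (d : PySem.Dict Char Int) (s : Int) :
    pvStepA d (s, 'b') = if d.contains 'b' then d else d.insert 'b' s := by
  by_cases h : d.contains 'b' <;> simp [pvStepA, h]

theorem pvStepA_other (d : PySem.Dict Char Int) (s : Int) (c : Char)
    (h1 : c ≠ 'a') (h2 : c ≠ 'b') : pvStepA d (s, c) = d := by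
  simp [pvStepA, h1, h2]

-- A's loop invariant: what the dict holds after folding the enumeration of cs starting at s
theorem pvLoopA_inv (cs : List Char) (s : Int) (d : PySem.Dict Char Int) :
    ((PySem.List.enumerate cs s).foldl pvStepA d).get? 'a'
      = (match pvLastA cs with
         | some j => some (s + (j : Int))
         | none => d.get? 'a')
    ∧ ((PySem.List.enumerate cs s).foldl pvStepA d).get? 'b'
      = (match d.get? 'b' with
         | some v => some v
         | none => Option.map (fun j : Nat => s + (j : Int)) (pvFirstB cs)) := by
  induction cs generalizing s d with
  | nil =>
    constructor
    · simp [PySem.List.enumerate_nil, pvLastA]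
    · simp only [PySem.List.enumerate_nil, List.foldl_nil, pvFirstB]
      cases d.get? 'b' <;> rfl
  | cons c cs ih =>
    rw [PySem.List.enumerate_cons]
    simp only [List.foldl_cons]
    by_cases hca : c = 'a'
    · subst hca
      rw [pvStepA_a]
      obtain ⟨iha, ihb⟩ := ih (s + 1) (d.insert 'a' s)
      constructor
      · rw [iha]
        cases hl : pvLastA cs with
        | none => simp [pvLastA, hl, PySem.Dict.get?_insert_self]
        | some j =>
          simp only [pvLastA, hl, Option.some.injEq]
          push_cast; ring
      · rw [ihb]
        rw [PySem.Dict.get?_insert_of_ne d s (by decide : 'b' ≠ 'a')]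
        simp only [pvFirstB, if_neg (by decide : ¬ ('a' = 'b'))]
        cases d.get? 'b' with
        | some v => rfl
        | none =>
          cases pvFirstB cs with
          | none => rfl
          | some j =>
            simp only [Option.map_some, Option.some.injEq]
            push_cast; ring
    · by_cases hcb : c = 'b'
      · subst hcb
        rw [pvStepA_b]
        obtain ⟨iha, ihb⟩ :=
          ih (s + 1) (if d.contains 'b' then d else d.insert 'b' s)
        constructor
        · rw [iha]
          simp only [pvLastA, if_neg (by decide : ¬ ('b' = 'a'))]
          cases hl : pvLastA cs with
          | none =>
            by_cases hcont : d.contains 'b'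
            · simp [hcont]
            · simp [hcont, PySem.Dict.get?_insert_of_ne d s (by decide : 'a' ≠ 'b')]
          | some j =>
            simp only [Option.some.injEq]
            push_cast; ring
        · rw [ihb]
          simp only [pvFirstB, reduceIte]
          cases hd : d.get? 'b' with
          | none =>
            have hcont : d.contains 'b' = false := by
              rw [PySem.Dict.contains_eq_isSome_get?, hd]; rfl
            simp [hcont, PySem.Dict.get?_insert_self]
          | some v =>
            have hcont : d.contains 'b' = true := by
              rw [PySem.Dict.contains_eq_isSome_get?, hd]; rfl
            simp [hcont, hd]
      · rw [pvStepA_other d s c hca hcb]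
        obtain ⟨iha, ihb⟩ := ih (s + 1) d
        constructor
        · rw [iha]
          simp only [pvLastA, if_neg hca]
          cases pvLastA cs with
          | none => rfl
          | some j =>
            simp only [Option.some.injEq]
            push_cast; ring
        · rw [ihb]
          simp only [pvFirstB, if_neg hcb]
          cases d.get? 'b' with
          | some v => rfl
          | none =>
            cases pvFirstB cs with
            | none => rfl
            | some j =>
              simp only [Option.map_some, Option.some.injEq]
              push_cast; ring

-- a one-character pattern is a prefix iff it is the head
theorem pvSingleton_prefix (l : List Char) (c : Char) : [c] <+: l ↔ l.head? = some c := by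
  cases l with
  | nil => simp
  | cons a t => simp [List.cons_prefix_cons, eq_comm]

-- a one-character pattern is an infix iff the character occurs
theorem pvSingleton_infix (l : List Char) (c : Char) : [c] <:+: l ↔ c ∈ l := by
  constructor
  · intro h; exact h.subset (by simp)
  · intro h
    obtain ⟨s, t, rfl⟩ := List.append_of_mem h
    exact ⟨s, t, by simp⟩

-- singleton-pattern find: PySem find of "b" lands exactly on pvFirstB
theorem pvFind_b (cs : List Char) :
    PySem.Chars.find cs ['b'] = (match pvFirstB cs with
      | some j => (j : Int)
      | none => -1) := by
  rcases hfb : pvFirstB cs with _ | j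
  · have hnb : 'b' ∉ cs := pvFirstB_none hfb
    have hfind : PySem.Chars.find cs ['b'] = -1 := by
      rw [PySem.Chars.find_eq_neg_one_iff]
      intro hinf
      exact hnb ((pvSingleton_infix cs 'b').mp hinf)
    simpa using hfind
  · obtain ⟨h1, h2⟩ := pvFirstB_spec hfb
    have hmem : 'b' ∈ cs := List.mem_of_getElem? h1
    have hinf : ['b'] <:+: cs := (pvSingleton_infix cs 'b').mpr hmem
    have hne : PySem.Chars.find cs ['b'] ≠ -1 := by
      rw [ne_eq, PySem.Chars.find_eq_neg_one_iff]
      simpa using hinf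
    have hge : 0 ≤ PySem.Chars.find cs ['b'] := by
      have := PySem.Chars.neg_one_le_find cs ['b']
      omega
    obtain ⟨hpre, hmin⟩ := PySem.Chars.find_spec (s := cs) (sub := ['b']) hge
    have hsing : ∀ i : Nat, (['b'] <+: cs.drop i) ↔ cs[i]? = some 'b' := by
      intro i
      rw [pvSingleton_prefix, List.head?_drop]
    have hfj : (PySem.Chars.find cs ['b']).toNat = j := by
      by_contra hne2
      rcases Nat.lt_or_ge (PySem.Chars.find cs ['b']).toNat j with hlt | hge2
      · exact h2 _ hlt ((hsing _).mp hpre)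
      · exact hmin j (by omega) ((hsing j).mpr h1)
    simp only []
    omega

-- membership in a suffix ↔ some index past the cut holds the character
theorem pvMem_drop_iff (cs : List Char) (k : Nat) (c : Char) :
    c ∈ cs.drop k ↔ ∃ i, k ≤ i ∧ cs[i]? = some c := by
  rw [List.mem_iff_getElem?]
  constructor
  · rintro ⟨n, hn⟩
    exact ⟨k + n, by omega, by rwa [List.getElem?_drop] at hn⟩
  · rintro ⟨i, hki, hget⟩
    exact ⟨i - k, by rw [List.getElem?_drop, Nat.add_sub_cancel' hki]; exact hget⟩

theorem pvMain (S : String) : solution S = solution_alt S := by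
  obtain ⟨iha, ihb⟩ := pvLoopA_inv S.toList 0 PySem.Dict.empty
  simp only [PySem.Dict.get?_empty] at iha ihb
  have hfind := pvFind_b S.toList
  have hbl : "b".toList = ['b'] := rfl
  have hal : "a".toList = ['a'] := rfl
  simp only [solution, solution_alt, PySem.Str.find_eq, hbl]
  rw [hfind, iha, ihb]
  rcases hfb : pvFirstB S.toList with _ | j
  · -- no 'b' anywhere: both sides are true
    rcases pvLastA S.toList with _ | l <;> simp
  · -- first 'b' at index j
    obtain ⟨hb1, hb2⟩ := pvFirstB_spec hfb
    have hj : ¬ ((j : Int) = -1) := by omega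
    obtain ⟨k, hk⟩ : ∃ k : Nat, k = j + 1 := ⟨j + 1, rfl⟩
    have hcast : ((j : Int) + 1) = (k : Int) := by rw [hk]; push_cast; ring
    have hslice : (PySem.Str.slice S (some (k : Int)) none).toList = S.toList.drop k := by
      have h1 : (PySem.Str.slice S (some (k : Int)) none).toList
          = PySem.List.slice S.toList (some (k : Int)) none := by
        simp [PySem.Str.slice]
      rw [h1, PySem.List.slice_from_natCast]
    rw [if_neg hj, PySem.Str.isIn_eq, hal, hcast, hslice]
    rcases hla : pvLastA S.toList with _ | l
    · -- no 'a' at all: A returns true; the suffix holds no 'a' either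
      have hfalse : PySem.Chars.isIn ['a'] (S.toList.drop k) = false := by
        rw [PySem.Chars.isIn_eq_false_iff]
        intro hinf
        exact pvLastA_none hla
          (List.mem_of_mem_drop ((pvSingleton_infix _ 'a').mp hinf))
      rw [hfalse]
      rfl
    · obtain ⟨ha1, ha2⟩ := pvLastA_spec hla
      have hlj : l ≠ j := fun h => by rw [h, hb1] at ha1; cases ha1
      simp only [Option.map_some]
      by_cases hgt : l < j
      · -- first b after last a: A true, and no 'a' after position j
        have hfalse : PySem.Chars.isIn ['a'] (S.toList.drop k) = false := by
          rw [PySem.Chars.isIn_eq_false_iff]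
          intro hinf
          obtain ⟨i, hki, hget⟩ :=
            (pvMem_drop_iff S.toList k 'a').mp ((pvSingleton_infix _ 'a').mp hinf)
          exact ha2 i (by omega) hget
        rw [hfalse, if_pos (by omega : (0 : Int) + ↑l < 0 + ↑j)]
        rfl
      · -- last a at or after first b: A false, and 'a' occurs after position j
        have hin : 'a' ∈ S.toList.drop k :=
          (pvMem_drop_iff S.toList k 'a').mpr ⟨l, by omega, ha1⟩
        have htrue : PySem.Chars.isIn ['a'] (S.toList.drop k) = true := by
          rw [PySem.Chars.isIn_iff_infix]
          exact (pvSingleton_infix _ 'a').mpr hin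
        rw [htrue, if_neg (by omega : ¬ ((0 : Int) + ↑l < 0 + ↑j))]
        rfl

-- ===== VERDICT (by name: the statement is the Claim_ definition above) =====
theorem solution_spec : Claim_equal_solution := by
  intro S _
  unfold Spec_solution
  exact pvMain S
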